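-- pv_equiv track=rewrite | github.com/MakeB-rin/Ejercicios-en-Python | Ejercicios Normales/E_ProblemaStrings.py | elimina
-- ===== SOURCE A (Python) =====
-- def esVocal(x):
--     return x == 'a' or x == 'e' or x == 'i' or x == 'o' or x == 'u'
--
-- def elimina(s, v):
--     ans = ""
--     n = len(s)
--     cnt = 0
--     for i in range(n):
--         if esVocal(s[i]):
--             cnt += 1
--         if(not esVocal(s[i])) or cnt != v//2 + 1:
--             ans += s[i]
--     return ans
-- ===== SOURCE B (Python) =====
-- def elimina(s, v):
--     target = v // 2 + 1
--     positions = [i for i, c in enumerate(s) if c in "aeiou"]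
--     if 1 <= target <= len(positions):
--         idx = positions[target - 1]
--         return s[:idx] + s[idx + 1:]
--     return s
-- ===== Notes on version B (the rewrite author's own statement) =====
-- stated objective: simpler
-- what changed: A counts vowels inline while conditionally appending each character to an accumulator string; B builds a table of vowel positions in one pass and then removes the single target position with two slices (or returns s unchanged when the target is out of range).
import Mathlib
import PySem

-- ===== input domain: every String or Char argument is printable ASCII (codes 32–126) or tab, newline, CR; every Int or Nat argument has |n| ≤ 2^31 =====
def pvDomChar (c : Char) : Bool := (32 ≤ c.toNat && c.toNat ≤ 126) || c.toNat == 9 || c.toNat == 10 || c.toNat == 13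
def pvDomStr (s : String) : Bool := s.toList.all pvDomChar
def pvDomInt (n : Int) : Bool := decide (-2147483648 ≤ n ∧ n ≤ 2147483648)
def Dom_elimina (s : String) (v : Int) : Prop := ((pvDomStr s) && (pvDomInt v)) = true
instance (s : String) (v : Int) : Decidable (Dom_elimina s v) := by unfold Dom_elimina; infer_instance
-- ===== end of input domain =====

-- B replaces A's inline count-and-conditional-append loop by a vowel-index table plus one slice-based removal (objective: simpler).

-- ===== PORT A =====
def esVocal (x : Char) : Bool :=
  x == 'a' || x == 'e' || x == 'i' || x == 'o' || x == 'u'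

-- loop body of A's for-loop, state = (ans, cnt)
def eliminaStep (t : Int) (st : List Char × Int) (x : Char) : List Char × Int :=
  let cnt := if esVocal x then st.2 + 1 else st.2
  (if esVocal x = false ∨ cnt ≠ t then st.1 ++ [x] else st.1, cnt)

def elimina (s : String) (v : Int) : String :=
  String.ofList (s.toList.foldl (eliminaStep (PySem.Int.floordiv v 2 + 1)) ([], 0)).1

-- ===== PORT B =====
def elimina_alt (s : String) (v : Int) : String :=
  let target := PySem.Int.floordiv v 2 + 1
  let positions :=
    ((PySem.List.enumerate s.toList).filter (fun p => decide (p.2 ∈ "aeiou".toList))).map Prod.fst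
  if 1 ≤ target ∧ target ≤ (positions.length : Int) then
    let idx := positions.getD (target - 1).toNat 0
    String.ofList (PySem.List.slice s.toList none (some idx) ++
                   PySem.List.slice s.toList (some (idx + 1)) none)
  else s

-- ===== PRECONDITION & SPEC =====
def Spec_elimina (s : String) (v : Int) (out : String) : Prop := out = elimina_alt s v
instance (s : String) (v : Int) (out : String) : Decidable (Spec_elimina s v out) := by unfold Spec_elimina; infer_instance

-- ===== CLAIM (what is proved, stated in full; the proofs are below) =====
def Claim_equal_elimina : Prop := ∀ (s : String) (v : Int), Dom_elimina s v → Spec_elimina s v (elimina s v)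

-- ===== LEMMAS AND PROOFS =====

-- the result of A's loop as structural recursion: remove the k-th remaining vowel (1-indexed)
def gElim (k : Int) : List Char → List Char
  | [] => []
  | x :: xs =>
      if esVocal x then (if k = 1 then gElim (k - 1) xs else x :: gElim (k - 1) xs)
      else x :: gElim k xs

-- vowel positions, recursively
def vpos : List Char → List Nat
  | [] => []
  | x :: xs => if esVocal x then 0 :: (vpos xs).map (· + 1) else (vpos xs).map (· + 1)

lemma vocal_mem (x : Char) : decide (x ∈ "aeiou".toList) = esVocal x := by
  have hl : "aeiou".toList = ['a','e','i','o','u'] := by decide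
  rw [Bool.eq_iff_iff, decide_eq_true_iff, hl]
  simp only [esVocal, List.mem_cons, List.not_mem_nil, or_false, Bool.or_eq_true, beq_iff_eq]
  tauto

lemma enumerate_filter (cs : List Char) : ∀ (i : Int),
    ((PySem.List.enumerate cs i).filter (fun p => decide (p.2 ∈ "aeiou".toList))).map Prod.fst
      = (vpos cs).map (fun n : Nat => i + (n : Int)) := by
  induction cs with
  | nil => intro i; simp [PySem.List.enumerate, vpos]
  | cons x xs ih =>
      intro i
      rw [show PySem.List.enumerate (x :: xs) i = (i, x) :: PySem.List.enumerate xs (i + 1) from rfl,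
          List.filter_cons]
      simp only [vocal_mem] at ih ⊢
      cases h : esVocal x with
      | true =>
          simp only [h, if_true, List.map_cons, vpos, ih (i + 1), List.map_map]
          congr 1
          · simp
          · refine List.map_congr_left ?_
            intro n _
            simp only [Function.comp_apply]
            push_cast
            ring
      | false =>
          simp only [h, Bool.false_eq_true, if_false, vpos, ih (i + 1), List.map_map]
          refine List.map_congr_left ?_
          intro n _
          simp only [Function.comp_apply]
          push_cast
          ring

lemma gElim_nonpos (cs : List Char) : ∀ (k : Int), k ≤ 0 → gElim k cs = cs := by
  induction cs with
  | nil => intro k _; rfl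
  | cons x xs ih =>
      intro k hk
      simp only [gElim]
      cases h : esVocal x with
      | true =>
          have h1 : k ≠ 1 := by omega
          simp [h1, ih (k - 1) (by omega)]
      | false =>
          simp [ih k hk]

lemma A_loop (t : Int) (cs : List Char) : ∀ (ans : List Char) (c : Int),
    (cs.foldl (eliminaStep t) (ans, c)).1 = ans ++ gElim (t - c) cs := by
  induction cs with
  | nil => intro ans c; simp [gElim]
  | cons x xs ih =>
      intro ans c
      simp only [List.foldl_cons, eliminaStep, gElim]
      cases h : esVocal x with
      | true =>
          simp only [if_true, Bool.true_eq_false, false_or]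
          by_cases ht : c + 1 = t
          · rw [if_neg (fun hn => hn ht), if_pos (show t - c = 1 by omega)]
            rw [ih ans (c + 1)]
            have he : t - (c + 1) = t - c - 1 := by ring
            rw [he]
          · rw [if_pos ht, if_neg (show ¬ t - c = 1 by omega)]
            rw [ih (ans ++ [x]) (c + 1)]
            have he : t - (c + 1) = t - c - 1 := by ring
            rw [he, List.append_assoc]
            rfl
      | false =>
          simp [ih]

lemma gElim_spec (cs : List Char) : ∀ (k : Int),
    gElim k cs =
      if 1 ≤ k ∧ k ≤ ((vpos cs).length : Int) then
        cs.take ((vpos cs).getD (k - 1).toNat 0) ++ cs.drop ((vpos cs).getD (k - 1).toNat 0 + 1)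
      else cs := by
  induction cs with
  | nil =>
      intro k
      rw [if_neg (by simp [vpos]; omega)]
      rfl
  | cons x xs ih =>
      intro k
      simp only [gElim, vpos]
      cases h : esVocal x with
      | true =>
          simp only [if_true]
          by_cases hk1 : k = 1
          · subst hk1
            rw [if_pos rfl,
                if_pos (show (1:Int) ≤ 1 ∧ (1:Int) ≤ ((0 :: (vpos xs).map (· + 1)).length : Int) by
                  simp)]
            simp [gElim_nonpos xs 0 (by omega)]
          · rw [if_neg hk1, ih (k - 1)]
            have he : k - 1 - 1 = k - 2 := by ring
            rw [he]
            by_cases hc : 1 ≤ k - 1 ∧ k - 1 ≤ ((vpos xs).length : Int)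
            · rw [if_pos hc,
                  if_pos (show 1 ≤ k ∧ k ≤ ((0 :: (vpos xs).map (· + 1)).length : Int) by
                    simp at hc ⊢; omega)]
              have hlt : (k - 2).toNat < (vpos xs).length := by omega
              have hidx : (0 :: (vpos xs).map (· + 1)).getD (k - 1).toNat 0
                  = (vpos xs).getD (k - 2).toNat 0 + 1 := by
                have hk2 : (k - 1).toNat = (k - 2).toNat + 1 := by omega
                rw [hk2, List.getD_cons_succ,
                    List.getD_eq_getElem _ _ (by simpa using hlt),
                    List.getD_eq_getElem _ _ hlt]
                simp
              rw [hidx, List.take_succ_cons, List.drop_succ_cons]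
              rfl
            · rw [if_neg hc,
                  if_neg (show ¬ (1 ≤ k ∧ k ≤ ((0 :: (vpos xs).map (· + 1)).length : Int)) by
                    simp at hc ⊢; omega)]
      | false =>
          simp only [Bool.false_eq_true, if_false, ih k]
          by_cases hc : 1 ≤ k ∧ k ≤ ((vpos xs).length : Int)
          · rw [if_pos hc,
                if_pos (show 1 ≤ k ∧ k ≤ (((vpos xs).map (· + 1)).length : Int) by
                  simpa using hc)]
            have hlt : (k - 1).toNat < (vpos xs).length := by omega
            have hidx : ((vpos xs).map (· + 1)).getD (k - 1).toNat 0
                = (vpos xs).getD (k - 1).toNat 0 + 1 := by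
              rw [List.getD_eq_getElem _ _ (by simpa using hlt),
                  List.getD_eq_getElem _ _ hlt]
              simp
            rw [hidx, List.take_succ_cons, List.drop_succ_cons]
            rfl
          · rw [if_neg hc,
                if_neg (show ¬ (1 ≤ k ∧ k ≤ (((vpos xs).map (· + 1)).length : Int)) by
                  simpa using hc)]

-- ===== VERDICT (by name: the statement is the Claim_ definition above) =====
theorem elimina_spec : Claim_equal_elimina := by
  intro s v _
  unfold Spec_elimina elimina elimina_alt
  set t := PySem.Int.floordiv v 2 + 1 with ht
  set cs := s.toList with hcs
  rw [A_loop t cs [] 0]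
  simp only [List.nil_append, sub_zero]
  rw [gElim_spec cs t]
  have hpos : ((PySem.List.enumerate cs).filter (fun p => decide (p.2 ∈ "aeiou".toList))).map Prod.fst
      = (vpos cs).map (fun n : Nat => (n : Int)) := by
    rw [enumerate_filter cs 0]
    refine List.map_congr_left ?_
    intro n _; omega
  rw [hpos]
  by_cases hc : 1 ≤ t ∧ t ≤ ((vpos cs).length : Int)
  · rw [if_pos (show 1 ≤ t ∧ t ≤ (((vpos cs).map (fun n : Nat => (n : Int))).length : Int) by
        simpa using hc),
      if_pos hc]
    have hlt : (t - 1).toNat < (vpos cs).length := by omega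
    have hidx : ((vpos cs).map (fun n : Nat => (n : Int))).getD (t - 1).toNat 0
        = (((vpos cs).getD (t - 1).toNat 0 : Nat) : Int) := by
      rw [List.getD_eq_getElem _ _ (by simpa using hlt),
          List.getD_eq_getElem _ _ hlt]
      simp
    rw [hidx,
        show (((vpos cs).getD (t - 1).toNat 0 : Nat) : Int) + 1
          = (((vpos cs).getD (t - 1).toNat 0 + 1 : Nat) : Int) by push_cast; ring,
        PySem.List.slice_to_natCast, PySem.List.slice_from_natCast]
  · rw [if_neg (show ¬ (1 ≤ t ∧ t ≤ (((vpos cs).map (fun n : Nat => (n : Int))).length : Int)) by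
        simpa using hc),
      if_neg hc]
    simp [hcs, String.ofList]
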